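-- pv_equiv track=rewrite | github.com/meezlung/git-test | lab10/prac/lec18/convert_base.py | multiply_by_base
-- ===== SOURCE A (Python) =====
-- def multiply_by_base(number, base, target_base):
--     carry = 0
--     result = []
--     for digit in number:
--         product = digit * base + carry
--         res_digit = product % target_base
--         carry = product // target_base
--         result.append(res_digit)
--     while carry > 0:
--         result.append(carry % target_base)
--         carry = carry // target_base
--     return result
-- ===== SOURCE B (Python) =====
-- def multiply_by_base(number, base, target_base):
--     n = 0
--     for d in reversed(number):
--         n = n * target_base + d
--     n *= base
--     result = []
--     for _ in range(len(number)):
--         result.append(n % target_base)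
--         n //= target_base
--     while n > 0:
--         result.append(n % target_base)
--         n //= target_base
--     return result
-- ===== Notes on version B (the rewrite author's own statement) =====
-- stated objective: alternative
-- what changed: Instead of propagating a per-digit carry in one pass, B folds the digit list into a single integer with Horner's method, multiplies once by base, then re-extracts len(number) digits by repeated divmod and flushes the remaining high part.
import Mathlib
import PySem

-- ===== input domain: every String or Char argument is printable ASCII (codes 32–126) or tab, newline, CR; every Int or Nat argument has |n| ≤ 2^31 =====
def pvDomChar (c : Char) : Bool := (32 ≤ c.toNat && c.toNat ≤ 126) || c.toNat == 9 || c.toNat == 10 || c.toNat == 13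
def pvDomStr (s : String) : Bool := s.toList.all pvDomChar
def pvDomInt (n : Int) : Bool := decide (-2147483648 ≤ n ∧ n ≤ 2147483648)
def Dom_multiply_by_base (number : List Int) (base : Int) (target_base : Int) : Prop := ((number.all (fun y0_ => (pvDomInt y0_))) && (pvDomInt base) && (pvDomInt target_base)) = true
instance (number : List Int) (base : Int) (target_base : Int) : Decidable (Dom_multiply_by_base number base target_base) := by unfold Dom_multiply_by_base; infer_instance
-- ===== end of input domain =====

-- B replaces A's single-pass per-digit carry propagation by Horner-folding the digits
-- into one integer, multiplying once, and re-extracting digits by repeated divmod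
-- (objective: alternative decomposition, same cost).

-- ===== PORT A =====
-- the trailing 'while carry > 0' loop (shared verbatim by both Pythons); fuel only
-- makes the recursion total — with carry > 0 and target_base ≥ 2 the fuel carry.toNat+1
-- suffices, and other terminating cases stop within it too
def pvFlush : Nat → Int → Int → List Int → List Int
  | 0, _, _, acc => acc
  | fuel + 1, carry, tb, acc =>
    if carry > 0 then
      pvFlush fuel (PySem.Int.floordiv carry tb) tb (acc ++ [PySem.Int.mod carry tb])
    else acc

def multiply_by_base (number : List Int) (base : Int) (target_base : Int) : List Int :=
  let st := number.foldl
    (fun (st : List Int × Int) digit =>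
      let product := digit * base + st.2
      (st.1 ++ [PySem.Int.mod product target_base], PySem.Int.floordiv product target_base))
    ([], 0)
  pvFlush (st.2.toNat + 1) st.2 target_base st.1

-- ===== PORT B =====
-- 'for _ in range(len(number)): result.append(n % tb); n //= tb'
def pvExtract : Nat → Int → Int → List Int → List Int × Int
  | 0, n, _, acc => (acc, n)
  | k + 1, n, tb, acc => pvExtract k (PySem.Int.floordiv n tb) tb (acc ++ [PySem.Int.mod n tb])

def multiply_by_base_alt (number : List Int) (base : Int) (target_base : Int) : List Int :=
  let n := (number.reverse.foldl (fun n d => n * target_base + d) 0) * base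
  let st := pvExtract number.length n target_base []
  pvFlush (st.2.toNat + 1) st.2 target_base st.1

-- ===== PRECONDITION & SPEC =====
-- Pre_ excludes only inputs where the Python A does not return: target_base = 0 with a
-- nonempty list (ZeroDivisionError), and target_base = 1 with base * sum(number) > 0
-- (the final carry equals base * sum(number) and 'carry //= 1' never shrinks it, so the
-- while loop diverges).
def Pre_multiply_by_base (number : List Int) (base : Int) (target_base : Int) : Prop :=
  (number = [] ∨ target_base ≠ 0) ∧ ¬(target_base = 1 ∧ base * number.sum > 0)
instance (number : List Int) (base : Int) (target_base : Int) : Decidable (Pre_multiply_by_base number base target_base) := by unfold Pre_multiply_by_base; infer_instance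

def pvWitness_multiply_by_base : List Int × Int × Int := ([3, 1, 4], 7, 10)

def Spec_multiply_by_base (number : List Int) (base : Int) (target_base : Int) (out : List Int) : Prop := out = multiply_by_base_alt number base target_base
instance (number : List Int) (base : Int) (target_base : Int) (out : List Int) : Decidable (Spec_multiply_by_base number base target_base out) := by unfold Spec_multiply_by_base; infer_instance

-- ===== CLAIM (what is proved, stated in full; the proofs are below) =====
def Claim_equal_multiply_by_base : Prop := ∀ (number : List Int) (base : Int) (target_base : Int), Dom_multiply_by_base number base target_base → Pre_multiply_by_base number base target_base → Spec_multiply_by_base number base target_base (multiply_by_base number base target_base)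

-- ===== LEMMAS AND PROOFS =====

-- Python floor-division: adding a multiple of the (nonzero) divisor shifts the quotient
-- and leaves the residue
theorem pv_step_div (q r tb : Int) (h : tb ≠ 0) :
    PySem.Int.floordiv (q * tb + r) tb = q + PySem.Int.floordiv r tb := by
  simp [PySem.Int.floordiv]
  rw [add_comm (q * tb) r, Int.add_mul_fdiv_right r q h, add_comm]

theorem pv_step_mod (q r tb : Int) :
    PySem.Int.mod (q * tb + r) tb = PySem.Int.mod r tb := by
  simp [PySem.Int.mod]

-- Horner value of d :: rest
theorem pv_horner_cons (d : Int) (rest : List Int) (tb : Int) :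
    (d :: rest).reverse.foldl (fun n x => n * tb + x) 0
      = (rest.reverse.foldl (fun n x => n * tb + x) 0) * tb + d := by
  simp [List.reverse_cons, List.foldl_append]

-- main invariant: extracting |xs| digits of (horner xs * base + c) is exactly A's
-- carry-propagating pass over xs with carry c
theorem pv_main (xs : List Int) (base tb : Int) (h : tb ≠ 0) :
    ∀ (c : Int) (acc : List Int),
    pvExtract xs.length ((xs.reverse.foldl (fun n d => n * tb + d) 0) * base + c) tb acc
      = xs.foldl
          (fun (st : List Int × Int) digit =>
            (st.1 ++ [PySem.Int.mod (digit * base + st.2) tb],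
             PySem.Int.floordiv (digit * base + st.2) tb))
          (acc, c) := by
  induction xs with
  | nil => intro c acc; simp [pvExtract]
  | cons d rest ih =>
    intro c acc
    have hv : ((d :: rest).reverse.foldl (fun n x => n * tb + x) 0) * base + c
        = (rest.reverse.foldl (fun n x => n * tb + x) 0) * base * tb + (d * base + c) := by
      rw [pv_horner_cons]; ring
    simp only [List.length_cons, pvExtract, List.foldl_cons, hv,
      pv_step_div _ _ _ h, pv_step_mod]
    exact ih (PySem.Int.floordiv (d * base + c) tb) (acc ++ [PySem.Int.mod (d * base + c) tb])

-- ===== VERDICT (by name: the statement is the Claim_ definition above) =====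
theorem multiply_by_base_spec : Claim_equal_multiply_by_base := by
  intro number base tb _ hpre
  unfold Spec_multiply_by_base multiply_by_base multiply_by_base_alt
  rcases hpre with ⟨hz, -⟩
  by_cases htb : tb = 0
  · have hnil : number = [] := by
      rcases hz with h | h
      · exact h
      · exact absurd htb h
    subst hnil; subst htb
    simp [pvExtract, pvFlush]
  · have := pv_main number base tb htb 0 []
    simp only [add_zero] at this
    simp only [this]
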